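-- pv_equiv track=rewrite | github.com/DanielHakim98/Python_Project-Caesar_Cipher | caesar_cipher.py | check_wrap_lower
-- ===== SOURCE A (Python) =====
-- def check_wrap_lower(byte):
--   if byte > 122:
--     while(byte > 122):
--       byte = (byte - 122) + 97 - 1
--   else:
--     while(byte < 97):
--       byte = 122 - (97 - byte) + 1
--   return byte
-- ===== SOURCE B (Python) =====
-- def check_wrap_lower(byte):
--   return 97 + (byte - 97) % 26
-- ===== Notes on version B (the rewrite author's own statement) =====
-- stated objective: simpler
-- what changed: Replaces the two subtract/add-26 while-loops with the single closed-form expression 97 + (byte - 97) % 26.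
import Mathlib
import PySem

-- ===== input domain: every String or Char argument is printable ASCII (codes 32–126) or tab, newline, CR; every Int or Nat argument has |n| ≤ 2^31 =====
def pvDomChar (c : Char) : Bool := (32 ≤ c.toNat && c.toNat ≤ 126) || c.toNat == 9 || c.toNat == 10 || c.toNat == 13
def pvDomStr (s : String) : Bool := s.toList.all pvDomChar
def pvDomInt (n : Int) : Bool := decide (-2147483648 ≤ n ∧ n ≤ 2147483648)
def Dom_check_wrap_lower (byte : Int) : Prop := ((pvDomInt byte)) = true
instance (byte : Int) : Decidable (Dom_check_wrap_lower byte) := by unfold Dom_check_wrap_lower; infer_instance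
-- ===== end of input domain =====

-- B replaces A's two subtract/add-26 while-loops with one closed-form modular expression (simpler).

-- ===== PORT A =====
-- the 'while byte > 122: byte = (byte - 122) + 97 - 1' loop (i.e. byte - 26 each step)
def pvWrapDown (b : Int) : Int :=
  if b > 122 then pvWrapDown ((b - 122) + 97 - 1) else b
termination_by (b - 122).toNat
decreasing_by omega

-- the 'while byte < 97: byte = 122 - (97 - byte) + 1' loop (i.e. byte + 26 each step)
def pvWrapUp (b : Int) : Int :=
  if b < 97 then pvWrapUp (122 - (97 - b) + 1) else b
termination_by (97 - b).toNat
decreasing_by omega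

def check_wrap_lower (byte : Int) : Int :=
  if byte > 122 then pvWrapDown byte else pvWrapUp byte

-- ===== PORT B =====
def check_wrap_lower_alt (byte : Int) : Int := 97 + PySem.Int.mod (byte - 97) 26

-- ===== PRECONDITION & SPEC =====
def Spec_check_wrap_lower (byte : Int) (out : Int) : Prop := out = check_wrap_lower_alt byte
instance (byte : Int) (out : Int) : Decidable (Spec_check_wrap_lower byte out) := by unfold Spec_check_wrap_lower; infer_instance

-- ===== CLAIM (what is proved, stated in full; the proofs are below) =====
def Claim_equal_check_wrap_lower : Prop := ∀ (byte : Int), Dom_check_wrap_lower byte → Spec_check_wrap_lower byte (check_wrap_lower byte)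

-- ===== LEMMAS AND PROOFS =====
theorem pvMod_closed (b : Int) (h1 : 97 ≤ b) (h2 : b ≤ 122) : 97 + PySem.Int.mod (b - 97) 26 = b := by
  have := PySem.Int.mod_eq_emod_of_pos (a := b - 97) (b := 26) (by norm_num)
  rw [this, Int.emod_eq_of_lt (by omega) (by omega)]; ring

theorem pvWrapDown_closed (b : Int) (h : 97 ≤ b) :
    pvWrapDown b = 97 + PySem.Int.mod (b - 97) 26 := by
  fun_induction pvWrapDown b with
  | case1 b hb ih =>
      rw [ih (by omega)]
      have : (b - 122 + 97 - 1 - 97) = (b - 97) - 26 := by ring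
      rw [this]
      have := PySem.Int.mod_eq_emod_of_pos (a := b - 97) (b := 26) (by norm_num)
      have h2 := PySem.Int.mod_eq_emod_of_pos (a := b - 97 - 26) (b := 26) (by norm_num)
      rw [this, h2, Int.sub_emod_right]
  | case2 b hb => exact (pvMod_closed b h (by omega)).symm

theorem pvWrapUp_closed (b : Int) (h : b ≤ 122) :
    pvWrapUp b = 97 + PySem.Int.mod (b - 97) 26 := by
  fun_induction pvWrapUp b with
  | case1 b hb ih =>
      rw [ih (by omega)]
      have : (122 - (97 - b) + 1 - 97) = (b - 97) + 26 := by ring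
      rw [this]
      have h1 := PySem.Int.mod_eq_emod_of_pos (a := b - 97) (b := 26) (by norm_num)
      have h2 := PySem.Int.mod_eq_emod_of_pos (a := b - 97 + 26) (b := 26) (by norm_num)
      rw [h1, h2, Int.add_emod_right]
  | case2 b hb => exact (pvMod_closed b (by omega) h).symm

-- ===== VERDICT (by name: the statement is the Claim_ definition above) =====
theorem check_wrap_lower_spec : Claim_equal_check_wrap_lower := by
  intro byte _
  unfold Spec_check_wrap_lower check_wrap_lower check_wrap_lower_alt
  split
  · exact pvWrapDown_closed byte (by omega)
  · exact pvWrapUp_closed byte (by omega)
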